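-- pv_equiv track=rewrite | github.com/kevinvlad03/BioInformatics | Labs/L8_Project/Ex3.py | find_palindromic_inverted_repeats
-- ===== SOURCE A (Python) =====
-- from collections import Counter, defaultdict
--
-- NUC_COMPLEMENT = {
--     "A": "T",
--     "T": "A",
--     "C": "G",
--     "G": "C"
-- }
--
-- def reverse_complement(seq: str) -> str:
--     return "".join(NUC_COMPLEMENT.get(b, "N") for b in seq[::-1])
--
-- def find_palindromic_inverted_repeats(sequence: str, min_len: int = 4, max_len: int = 6):
--     sites_by_len = defaultdict(list)
--     n = len(sequence)
--     for L in range(min_len, max_len + 1):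
--         if L > n:
--             continue
--         for i in range(0, n - L + 1):
--             fragment = sequence[i:i + L]
--             if "N" in fragment:
--                 continue
--             if fragment == reverse_complement(fragment):
--                 start = i + 1
--                 end = i + L
--                 sites_by_len[L].append((start, end, fragment))
--     return sites_by_len
-- ===== SOURCE B (Python) =====
-- from collections import defaultdict
--
-- NUC_COMPLEMENT = {
--     "A": "T",
--     "T": "A",
--     "C": "G",
--     "G": "C"
-- }
--
-- def find_palindromic_inverted_repeats(sequence: str, min_len: int = 4, max_len: int = 6):
--     # Expand around each center: every reverse-complement palindrome has even
--     # length, so grow symmetric pairs outward from each gap between characters.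
--     n = len(sequence)
--     buckets = {}
--     for c in range(n + 1):
--         l, r = c - 1, c
--         while l >= 0 and r < n and NUC_COMPLEMENT.get(sequence[l]) == sequence[r]:
--             L = r - l + 1
--             if L > max_len:
--                 break
--             if L >= min_len:
--                 buckets.setdefault(L, []).append((l + 1, r + 1, sequence[l:r + 1]))
--             l -= 1
--             r += 1
--     out = defaultdict(list)
--     for L in sorted(buckets):
--         out[L] = buckets[L]
--     return out
-- ===== Notes on version B (the rewrite author's own statement) =====
-- stated objective: alternative
-- what changed: Replaces the per-length sliding-window scan (slice each window, build its reverse complement string, compare) with expand-around-center: grow complementary pairs outward from each of the n+1 centers, stopping at the first mismatch or at max_len, bucketing hits by length and emitting buckets in sorted key order.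
-- intended difference: On inputs with min_len <= 0 and max_len >= min_len, A emits nonsense empty-fragment hits such as (1, 0, '') under every non-positive length key L (an empty slice trivially equals its own reverse complement); B returns only genuine repeats of positive even length, which is the intended behaviour. — e.g. on find_palindromic_inverted_repeats("", 0, 0): A returns [(0, [(1, 0, "")])], B returns []
import Mathlib
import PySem

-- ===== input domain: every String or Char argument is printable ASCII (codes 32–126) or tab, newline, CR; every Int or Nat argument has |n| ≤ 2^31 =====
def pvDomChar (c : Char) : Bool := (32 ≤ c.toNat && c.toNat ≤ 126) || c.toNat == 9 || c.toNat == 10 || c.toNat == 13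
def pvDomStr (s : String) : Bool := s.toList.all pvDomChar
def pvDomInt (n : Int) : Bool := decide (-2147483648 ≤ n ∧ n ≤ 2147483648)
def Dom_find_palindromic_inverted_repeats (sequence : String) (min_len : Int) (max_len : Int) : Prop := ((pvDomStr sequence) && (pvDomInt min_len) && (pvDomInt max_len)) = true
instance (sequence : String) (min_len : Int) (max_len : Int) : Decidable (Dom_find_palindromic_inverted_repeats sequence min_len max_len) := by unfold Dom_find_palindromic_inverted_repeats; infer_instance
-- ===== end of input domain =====

-- B replaces A's per-length window scan with expand-around-center (a different algorithm);
-- on min_len ≤ 0 A returns degenerate empty-fragment hits that B intentionally omits (see D_ below).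

-- ===== PORT A =====
-- NUC_COMPLEMENT maps single-character strings; iterating a Python str yields its
-- characters, so modelling it as a Char-keyed dict is exact.
def nucComplement : PySem.Dict Char Char :=
  PySem.Dict.ofList [('A', 'T'), ('T', 'A'), ('C', 'G'), ('G', 'C')]

def reverse_complement (seq : List Char) : List Char :=
  (PySem.List.slice? seq none none (-1)).getD [] |>.map (fun b => (nucComplement.get? b).getD 'N')

def find_palindromic_inverted_repeats (sequence : String) (min_len : Int) (max_len : Int) : List (Int × List (Int × Int × String)) :=
  let cs := sequence.toList
  let n : Int := PySem.List.len cs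
  let sites_by_len : PySem.Dict Int (List (Int × Int × String)) :=
    (PySem.List.pyRange min_len (max_len + 1) 1).foldl (fun d L =>
      if L > n then d
      else
        (PySem.List.pyRange 0 (n - L + 1) 1).foldl (fun d i =>
          let fragment := PySem.List.slice cs (some i) (some (i + L))
          if fragment.contains 'N' then d
          else if fragment = reverse_complement fragment then
            d.modify L [] (· ++ [(i + 1, i + L, String.ofList fragment)])  -- sites_by_len[L].append(...)
          else d) d) PySem.Dict.empty
  sites_by_len.items

-- ===== PORT B =====
-- the while-loop of Source B: expand (l, r) outward while the pair complements
def pvExpand (cs : List Char) (n : Int) (min_len : Int) (max_len : Int) (l : Int) (r : Int)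
    (b : PySem.Dict Int (List (Int × Int × String))) : PySem.Dict Int (List (Int × Int × String)) :=
  if h : 0 ≤ l ∧ r < n ∧ (PySem.List.pyGet? cs l).bind nucComplement.get? = PySem.List.pyGet? cs r then
    let L := r - l + 1
    if L > max_len then b
    else
      let b' := if min_len ≤ L then
          b.modify L [] (· ++ [(l + 1, r + 1, String.ofList (PySem.List.slice cs (some l) (some (r + 1))))])
        else b
      pvExpand cs n min_len max_len (l - 1) (r + 1) b'
  else b
termination_by (l + 1).toNat
decreasing_by omega

def find_palindromic_inverted_repeats_alt (sequence : String) (min_len : Int) (max_len : Int) : List (Int × List (Int × Int × String)) :=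
  let cs := sequence.toList
  let n : Int := PySem.List.len cs
  let buckets : PySem.Dict Int (List (Int × Int × String)) :=
    (PySem.List.pyRange 0 (n + 1) 1).foldl
      (fun b c => pvExpand cs n min_len max_len (c - 1) c b) PySem.Dict.empty
  (PySem.List.sorted buckets.keys (fun x => x) false).map (fun L => (L, buckets.getD L []))

-- ===== PRECONDITION & SPEC =====
-- On inputs with min_len ≤ 0 (and max_len ≥ min_len so the length loop runs), A emits
-- degenerate empty-fragment hits such as (1, 0, "") under every non-positive length key
-- (an empty slice trivially equals its own reverse complement); B returns only genuine
-- repeats of positive even length, which is the intended behaviour.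
def D_find_palindromic_inverted_repeats (sequence : String) (min_len : Int) (max_len : Int) : Prop :=
  min_len ≤ 0 ∧ min_len ≤ max_len
instance (sequence : String) (min_len : Int) (max_len : Int) : Decidable (D_find_palindromic_inverted_repeats sequence min_len max_len) := by unfold D_find_palindromic_inverted_repeats; infer_instance

def Spec_find_palindromic_inverted_repeats (sequence : String) (min_len : Int) (max_len : Int) (out : List (Int × List (Int × Int × String))) : Prop := ¬ D_find_palindromic_inverted_repeats sequence min_len max_len → out = find_palindromic_inverted_repeats_alt sequence min_len max_len
instance (sequence : String) (min_len : Int) (max_len : Int) (out : List (Int × List (Int × Int × String))) : Decidable (Spec_find_palindromic_inverted_repeats sequence min_len max_len out) := by unfold Spec_find_palindromic_inverted_repeats; infer_instance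

def pvDiffWitness_find_palindromic_inverted_repeats : String × Int × Int := ("", 0, 0)
def pvDiffWitnessOut_find_palindromic_inverted_repeats : (List (Int × List (Int × Int × String))) × (List (Int × List (Int × Int × String))) :=
  ([(0, [(1, 0, "")])], [])

-- ===== CLAIM (what is proved, stated in full; the proofs are below) =====
def Claim_unchanged_find_palindromic_inverted_repeats : Prop := ∀ (sequence : String) (min_len : Int) (max_len : Int), Dom_find_palindromic_inverted_repeats sequence min_len max_len → Spec_find_palindromic_inverted_repeats sequence min_len max_len (find_palindromic_inverted_repeats sequence min_len max_len)
def Claim_changed_find_palindromic_inverted_repeats : Prop := Dom_find_palindromic_inverted_repeats (pvDiffWitness_find_palindromic_inverted_repeats.1) (pvDiffWitness_find_palindromic_inverted_repeats.2.1) (pvDiffWitness_find_palindromic_inverted_repeats.2.2) ∧ D_find_palindromic_inverted_repeats (pvDiffWitness_find_palindromic_inverted_repeats.1) (pvDiffWitness_find_palindromic_inverted_repeats.2.1) (pvDiffWitness_find_palindromic_inverted_repeats.2.2) ∧ find_palindromic_inverted_repeats (pvDiffWitness_find_palindromic_inverted_repeats.1) (pvDiffWitness_find_palindromic_inverted_repeats.2.1)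 (pvDiffWitness_find_palindromic_inverted_repeats.2.2) = pvDiffWitnessOut_find_palindromic_inverted_repeats.1 ∧ find_palindromic_inverted_repeats_alt (pvDiffWitness_find_palindromic_inverted_repeats.1) (pvDiffWitness_find_palindromic_inverted_repeats.2.1) (pvDiffWitness_find_palindromic_inverted_repeats.2.2) = pvDiffWitnessOut_find_palindromic_inverted_repeats.2 ∧ pvDiffWitnessOut_find_palindromic_inverted_repeats.1 ≠ pvDiffWitnessOut_find_palindromic_inverted_repeats.2
def Claim_exact_find_palindromic_inverted_repeats : Prop := ∀ (sequence : String) (min_len : Int) (max_len : Int), Dom_find_palindromic_inverted_repeats sequence min_len max_len → D_find_palindromic_inverted_repeats sequence min_len max_len → find_palindromic_inverted_repeats sequence min_len max_len ≠ find_palindromic_inverted_repeats_alt sequence min_len max_len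

-- ===== LEMMAS AND PROOFS =====

-- A Bool test equal to A's inner-window condition ("no N" and fragment = its reverse complement)
def pvTestA (cs : List Char) (L i : Int) : Bool :=
  !(PySem.List.slice cs (some i) (some (i + L))).contains 'N' &&
  decide (PySem.List.slice cs (some i) (some (i + L)) = reverse_complement (PySem.List.slice cs (some i) (some (i + L))))

def pvIdx (cs : List Char) (L : Int) : List Int :=
  (PySem.List.pyRange 0 ((cs.length : Int) - L + 1) 1).filter (pvTestA cs L)

def pvHit (cs : List Char) (L i : Int) : Int × Int × String :=
  (i + 1, i + L, String.ofList (PySem.List.slice cs (some i) (some (i + L))))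

def pvVal (cs : List Char) (L : Int) : List (Int × Int × String) := (pvIdx cs L).map (pvHit cs L)

def pvLs (cs : List Char) (mn mx : Int) : List Int :=
  (PySem.List.pyRange mn (mx + 1) 1).filter (fun L => !(pvIdx cs L).isEmpty)

-- the while-condition of B's expansion loop
def pvPairOK (cs : List Char) (l r : Int) : Bool :=
  decide (0 ≤ l) && decide (r < (cs.length : Int)) &&
  decide ((PySem.List.pyGet? cs l).bind nucComplement.get? = PySem.List.pyGet? cs r)

def pvM (L l r : Int) : Nat := ((L - (r - l + 1)) / 2).toNat

-- "expansion started at (l, r) emits a hit of length L"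
def pvC (cs : List Char) (mn mx L l r : Int) : Bool :=
  decide (r - l + 1 ≤ L) && decide ((L - (r - l + 1)) % 2 = 0) && decide (mn ≤ L) && decide (L ≤ mx) &&
  decide (∀ k : Nat, k ≤ pvM L l r → pvPairOK cs (l - (k : Int)) (r + (k : Int)) = true)

-- the (key, hit) pairs pvExpand appends, in order
def pvProd (cs : List Char) (mn mx l r : Int) : List (Int × (Int × Int × String)) :=
  if h : pvPairOK cs l r = true then
    if r - l + 1 > mx then []
    else (if mn ≤ r - l + 1 then
            [(r - l + 1, (l + 1, r + 1, String.ofList (PySem.List.slice cs (some l) (some (r + 1)))))]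
          else [])
         ++ pvProd cs mn mx (l - 1) (r + 1)
  else []
termination_by (l + 1).toNat
decreasing_by
  unfold pvPairOK at h
  simp only [Bool.and_eq_true, decide_eq_true_eq] at h
  omega

def pvP (cs : List Char) (mn mx : Int) : List (Int × (Int × Int × String)) :=
  (PySem.List.pyRange 0 ((cs.length : Int) + 1) 1).flatMap (fun c => pvProd cs mn mx (c - 1) c)

lemma pv_foldl_modify {T : Type} (xs : List Int) (d : PySem.Dict Int (List T)) (k : Int) (g : Int → T) :
    xs.foldl (fun d i => d.modify k [] (· ++ [g i])) d
      = if xs.isEmpty then d else d.modify k [] (· ++ xs.map g) := by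
  have hmod : ∀ (e : PySem.Dict Int (List T)) (f : List T → List T),
      e.modify k [] f = e.insert k (f (e.getD k [])) := fun _ _ => rfl
  induction xs generalizing d with
  | nil => rfl
  | cons x xs ih =>
    rw [List.foldl_cons, ih]
    by_cases hxs : xs = []
    · subst hxs; simp
    · simp only [List.isEmpty_eq_false_iff.mpr hxs, List.isEmpty_cons]
      rw [hmod, hmod, hmod, PySem.Dict.getD_insert_self, PySem.Dict.insert_insert_self]
      simp

lemma pv_inner_eq (cs : List Char) (L : Int) (d : PySem.Dict Int (List (Int × Int × String))) :
    (PySem.List.pyRange 0 ((cs.length : Int) - L + 1) 1).foldl (fun d i =>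
        let fragment := PySem.List.slice cs (some i) (some (i + L))
        if fragment.contains 'N' then d
        else if fragment = reverse_complement fragment then
          d.modify L [] (· ++ [(i + 1, i + L, String.ofList fragment)])
        else d) d
      = if (pvIdx cs L).isEmpty then d else d.modify L [] (· ++ pvVal cs L) := by
  have hstep : (fun (d : PySem.Dict Int (List (Int × Int × String))) (i : Int) =>
        let fragment := PySem.List.slice cs (some i) (some (i + L))
        if fragment.contains 'N' then d
        else if fragment = reverse_complement fragment then
          d.modify L [] (· ++ [(i + 1, i + L, String.ofList fragment)])
        else d)
      = (fun d i => if pvTestA cs L i then d.modify L [] (· ++ [pvHit cs L i]) else d) := by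
    funext d i
    by_cases hN : (PySem.List.slice cs (some i) (some (i + L))).contains 'N' = true
    · rw [if_pos hN]
      have ht : pvTestA cs L i = false := by unfold pvTestA; rw [hN]; rfl
      rw [ht]
      simp
    · have hNf : (PySem.List.slice cs (some i) (some (i + L))).contains 'N' = false := by
        revert hN; cases (PySem.List.slice cs (some i) (some (i + L))).contains 'N' <;> simp
      rw [if_neg hN]
      by_cases heq : PySem.List.slice cs (some i) (some (i + L))
          = reverse_complement (PySem.List.slice cs (some i) (some (i + L)))
      · rw [if_pos heq]
        have ht : pvTestA cs L i = true := by unfold pvTestA; rw [hNf, decide_eq_true heq]; rfl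
        rw [ht]
        simp [pvHit]
      · rw [if_neg heq]
        have ht : pvTestA cs L i = false := by unfold pvTestA; rw [decide_eq_false heq]; simp
        rw [ht]
        simp
  rw [hstep, PySem.List.foldl_if_eq_foldl_filter, pv_foldl_modify]
  rfl

lemma pv_outer (cs : List Char) : ∀ (Ls : List Int) (d : PySem.Dict Int (List (Int × Int × String))),
    Ls.Nodup → d.keys.Nodup → (∀ L ∈ Ls, d.contains L = false) →
    (Ls.foldl (fun d L => if (pvIdx cs L).isEmpty then d else d.modify L [] (· ++ pvVal cs L)) d).items
      = d.items ++ (Ls.filter (fun L => !(pvIdx cs L).isEmpty)).map (fun L => (L, pvVal cs L)) := by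
  intro Ls
  induction Ls with
  | nil => intro d _ _ _; simp
  | cons L Ls ih =>
    intro d hnd hkeys hfresh
    rw [List.foldl_cons]
    by_cases hemp : (pvIdx cs L).isEmpty
    · rw [if_pos hemp, ih d hnd.of_cons hkeys (fun L' hL' => hfresh L' (List.mem_cons_of_mem _ hL'))]
      simp [hemp]
    · rw [if_neg hemp]
      have hfr : d.contains L = false := hfresh L List.mem_cons_self
      have hmod : d.modify L [] (· ++ pvVal cs L) = d.insert L (pvVal cs L) := by
        show d.insert L (d.getD L [] ++ pvVal cs L) = _
        rw [PySem.Dict.getD_of_not_contains _ _ hfr]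
        rfl
      rw [hmod, ih _ hnd.of_cons (PySem.Dict.nodup_keys_insert _ _ _ hkeys)]
      · rw [PySem.Dict.items_insert_of_not_contains _ _ hfr]
        simp [hemp]
      · intro L' hL'
        rw [PySem.Dict.contains_insert]
        have : L' ≠ L := by rintro rfl; exact (List.nodup_cons.mp hnd).1 hL'
        simp [this, hfresh L' (List.mem_cons_of_mem _ hL')]

lemma pv_A_items (s : String) (mn mx : Int) :
    find_palindromic_inverted_repeats s mn mx
      = (pvLs s.toList mn mx).map (fun L => (L, pvVal s.toList L)) := by
  unfold find_palindromic_inverted_repeats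
  simp only [PySem.List.len_eq]
  have hstep : (fun (d : PySem.Dict Int (List (Int × Int × String))) (L : Int) =>
      if L > (s.toList.length : Int) then d
      else (PySem.List.pyRange 0 ((s.toList.length : Int) - L + 1) 1).foldl (fun d i =>
        let fragment := PySem.List.slice s.toList (some i) (some (i + L))
        if fragment.contains 'N' then d
        else if fragment = reverse_complement fragment then
          d.modify L [] (· ++ [(i + 1, i + L, String.ofList fragment)])
        else d) d)
    = (fun d L => if (pvIdx s.toList L).isEmpty then d else d.modify L [] (· ++ pvVal s.toList L)) := by
    funext d L
    by_cases hn : L > (s.toList.length : Int)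
    · rw [if_pos hn]
      have : pvIdx s.toList L = [] := by
        unfold pvIdx
        rw [PySem.List.pyRange_one_eq_nil (by omega)]
        rfl
      rw [this]
      rfl
    · rw [if_neg hn, pv_inner_eq]
  rw [hstep, pv_outer s.toList _ _ (PySem.List.nodup_pyRange_one mn (mx + 1))
    PySem.Dict.nodup_keys_empty (fun L _ => PySem.Dict.contains_empty L)]
  rfl

lemma pv_expand_eq (cs : List Char) (mn mx : Int) :
    ∀ (l r : Int) (b : PySem.Dict Int (List (Int × Int × String))),
    pvExpand cs (cs.length : Int) mn mx l r b
      = (pvProd cs mn mx l r).foldl (fun b p => b.modify p.1 [] (· ++ [p.2])) b := by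
  suffices h : ∀ (m : Nat) (l r : Int) (b : PySem.Dict Int (List (Int × Int × String))),
      (l + 1).toNat ≤ m →
      pvExpand cs (cs.length : Int) mn mx l r b
        = (pvProd cs mn mx l r).foldl (fun b p => b.modify p.1 [] (· ++ [p.2])) b by
    exact fun l r b => h ((l + 1).toNat) l r b le_rfl
  intro m
  induction m with
  | zero =>
    intro l r b hm
    have hl : ¬ 0 ≤ l := by omega
    have hokf : ¬ pvPairOK cs l r = true := by
      unfold pvPairOK
      simp only [Bool.and_eq_true, decide_eq_true_eq, not_and]
      intro h0
      exact absurd h0.1 hl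
    rw [pvExpand, pvProd, dif_neg (by rintro ⟨h0, -⟩; exact hl h0), dif_neg hokf]
    rfl
  | succ m ih =>
    intro l r b hm
    rw [pvExpand, pvProd]
    by_cases hok : pvPairOK cs l r = true
    · have hc : 0 ≤ l ∧ r < (cs.length : Int) ∧
          (PySem.List.pyGet? cs l).bind nucComplement.get? = PySem.List.pyGet? cs r := by
        unfold pvPairOK at hok
        simp only [Bool.and_eq_true, decide_eq_true_eq] at hok
        exact ⟨hok.1.1, hok.1.2, hok.2⟩
      rw [dif_pos hc, dif_pos hok]
      dsimp only
      by_cases hmax : r - l + 1 > mx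
      · rw [if_pos hmax, if_pos hmax]
        rfl
      · rw [if_neg hmax, if_neg hmax]
        simp only [List.foldl_append]
        by_cases hmin : mn ≤ r - l + 1
        · rw [if_pos hmin, if_pos hmin]
          rw [ih (l - 1) (r + 1) _ (by omega)]
          rfl
        · rw [if_neg hmin, if_neg hmin]
          rw [ih (l - 1) (r + 1) _ (by omega)]
          rfl
    · have hc : ¬ (0 ≤ l ∧ r < (cs.length : Int) ∧
          (PySem.List.pyGet? cs l).bind nucComplement.get? = PySem.List.pyGet? cs r) := by
        intro h
        apply hok
        unfold pvPairOK
        simp only [Bool.and_eq_true, decide_eq_true_eq]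
        exact ⟨⟨h.1, h.2.1⟩, h.2.2⟩
      rw [dif_neg hc, dif_neg hok]
      rfl

lemma pv_prod_filter (cs : List Char) (mn mx : Int) (L : Int) :
    ∀ (l r : Int),
    (pvProd cs mn mx l r).filter (fun p => p.1 == L)
      = if pvC cs mn mx L l r = true then
          [(L, (l - (pvM L l r : Int) + 1, r + (pvM L l r : Int) + 1,
              String.ofList (PySem.List.slice cs (some (l - (pvM L l r : Int))) (some (r + (pvM L l r : Int) + 1)))))]
        else [] := by
  suffices h : ∀ (m : Nat) (l r : Int), (l + 1).toNat ≤ m →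
      (pvProd cs mn mx l r).filter (fun p => p.1 == L)
        = if pvC cs mn mx L l r = true then
            [(L, (l - (pvM L l r : Int) + 1, r + (pvM L l r : Int) + 1,
                String.ofList (PySem.List.slice cs (some (l - (pvM L l r : Int))) (some (r + (pvM L l r : Int) + 1)))))]
          else [] by
    exact fun l r => h ((l + 1).toNat) l r le_rfl
  intro m
  induction m with
  | zero =>
    intro l r hm
    have hl : ¬ 0 ≤ l := by omega
    have hokf : ¬ pvPairOK cs l r = true := by
      unfold pvPairOK
      simp only [Bool.and_eq_true, decide_eq_true_eq, not_and]
      intro h0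
      exact absurd h0.1 hl
    rw [pvProd, dif_neg hokf, if_neg]
    · rfl
    · unfold pvC
      simp only [Bool.and_eq_true, decide_eq_true_eq, not_and]
      intro _ h5
      exact hokf (by simpa using h5 0 (Nat.zero_le _))
  | succ m ih =>
    intro l r hm
    rw [pvProd]
    by_cases hok : pvPairOK cs l r = true
    · have h0l : 0 ≤ l := by
        unfold pvPairOK at hok
        simp only [Bool.and_eq_true, decide_eq_true_eq] at hok
        exact hok.1.1
      rw [dif_pos hok]
      by_cases hmax : r - l + 1 > mx
      · rw [if_pos hmax, if_neg]
        · rfl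
        · unfold pvC
          simp only [Bool.and_eq_true, decide_eq_true_eq, not_and]
          intro h1 _
          omega
      · rw [if_neg hmax, List.filter_append, ih (l - 1) (r + 1) (by omega)]
        by_cases hL : L = r - l + 1
        · -- the head emission (if any) carries key L; the tail never does
          have hC' : ¬ pvC cs mn mx L (l - 1) (r + 1) = true := by
            unfold pvC
            simp only [Bool.and_eq_true, decide_eq_true_eq, not_and]
            intro h1
            omega
          rw [if_neg hC']
          have hCiff : pvC cs mn mx L l r = true ↔ mn ≤ r - l + 1 := by
            unfold pvC
            simp only [Bool.and_eq_true, decide_eq_true_eq]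
            constructor
            · intro h; omega
            · intro h
              refine ⟨⟨⟨⟨by omega, by omega⟩, by omega⟩, by omega⟩, ?_⟩
              intro k hk
              have hk0 : k = 0 := by
                have : pvM L l r = 0 := by unfold pvM; omega
                omega
              subst hk0
              simpa using hok
          have hM0 : (pvM L l r : Int) = 0 := by
            unfold pvM
            omega
          by_cases hmn : mn ≤ r - l + 1
          · rw [if_pos hmn, if_pos (hCiff.mpr hmn)]
            subst hL
            rw [hM0]
            norm_num
          · rw [if_neg hmn, if_neg (fun hc => hmn (hCiff.mp hc))]
            rfl
        · have hemit : (if mn ≤ r - l + 1 then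
                [(r - l + 1, (l + 1, r + 1, String.ofList (PySem.List.slice cs (some l) (some (r + 1)))))]
              else []).filter (fun p => p.1 == L) = [] := by
            by_cases hmn : mn ≤ r - l + 1
            · rw [if_pos hmn]
              simp [Ne.symm hL]
            · rw [if_neg hmn]; rfl
          rw [hemit, List.nil_append]
          have hCiff : pvC cs mn mx L (l - 1) (r + 1) = pvC cs mn mx L l r := by
            rw [Bool.eq_iff_iff]
            unfold pvC
            simp only [Bool.and_eq_true, decide_eq_true_eq]
            constructor
            · rintro ⟨⟨⟨⟨h1, h2⟩, h3⟩, h4⟩, h5⟩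
              refine ⟨⟨⟨⟨by omega, by omega⟩, h3⟩, h4⟩, ?_⟩
              intro k hk
              match k with
              | 0 => simpa using hok
              | (k' + 1) =>
                have hk' : k' ≤ pvM L (l - 1) (r + 1) := by
                  unfold pvM at hk ⊢
                  omega
                have := h5 k' hk'
                have e1 : l - 1 - (k' : Int) = l - ((k' + 1 : Nat) : Int) := by push_cast; ring
                have e2 : r + 1 + (k' : Int) = r + ((k' + 1 : Nat) : Int) := by push_cast; ring
                rwa [e1, e2] at this
            · rintro ⟨⟨⟨⟨h1, h2⟩, h3⟩, h4⟩, h5⟩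
              refine ⟨⟨⟨⟨by omega, by omega⟩, h3⟩, h4⟩, ?_⟩
              intro k hk
              have hk' : k + 1 ≤ pvM L l r := by
                unfold pvM at hk ⊢
                omega
              have := h5 (k + 1) hk'
              have e1 : l - ((k + 1 : Nat) : Int) = l - 1 - (k : Int) := by push_cast; ring
              have e2 : r + ((k + 1 : Nat) : Int) = r + 1 + (k : Int) := by push_cast; ring
              rwa [e1, e2] at this
          rw [hCiff]
          by_cases hC : pvC cs mn mx L l r = true
          · rw [if_pos hC, if_pos hC]
            have harith : r - l + 1 ≤ L ∧ (L - (r - l + 1)) % 2 = 0 := by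
              unfold pvC at hC
              simp only [Bool.and_eq_true, decide_eq_true_eq] at hC
              exact ⟨hC.1.1.1.1, hC.1.1.1.2⟩
            have e1 : l - 1 - (pvM L (l - 1) (r + 1) : Int) = l - (pvM L l r : Int) := by
              unfold pvM
              omega
            have e2 : r + 1 + (pvM L (l - 1) (r + 1) : Int) = r + (pvM L l r : Int) := by
              unfold pvM
              omega
            rw [e1, e2]
          · rw [if_neg hC, if_neg hC]
    · have hokf := hok
      rw [dif_neg hok, if_neg]
      · rfl
      · unfold pvC
        simp only [Bool.and_eq_true, decide_eq_true_eq, not_and]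
        intro _ h5
        exact hokf (by simpa using h5 0 (Nat.zero_le _))

lemma pv_comp_cases {x y : Char} (h : nucComplement.get? x = some y) :
    (x = 'A' ∧ y = 'T') ∨ (x = 'T' ∧ y = 'A') ∨ (x = 'C' ∧ y = 'G') ∨ (x = 'G' ∧ y = 'C') := by
  have e : nucComplement = PySem.Dict.mk [('A', 'T'), ('T', 'A'), ('C', 'G'), ('G', 'C')] := rfl
  rw [e] at h
  simp only [PySem.Dict.get?_mk_cons] at h
  split_ifs at h with h1 h2 h3 h4
  · exact Or.inl ⟨(eq_of_beq h1).symm, by simpa using h.symm⟩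
  · exact Or.inr (Or.inl ⟨(eq_of_beq h2).symm, by simpa using h.symm⟩)
  · exact Or.inr (Or.inr (Or.inl ⟨(eq_of_beq h3).symm, by simpa using h.symm⟩))
  · exact Or.inr (Or.inr (Or.inr ⟨(eq_of_beq h4).symm, by simpa using h.symm⟩))
  · simp [PySem.Dict.get?] at h

lemma pv_comp_symm {x y : Char} (h : nucComplement.get? x = some y) :
    nucComplement.get? y = some x := by
  rcases pv_comp_cases h with ⟨rfl, rfl⟩ | ⟨rfl, rfl⟩ | ⟨rfl, rfl⟩ | ⟨rfl, rfl⟩ <;> rfl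

lemma pv_comp_ne_self {x y : Char} (h : nucComplement.get? x = some y) : y ≠ x := by
  rcases pv_comp_cases h with ⟨rfl, rfl⟩ | ⟨rfl, rfl⟩ | ⟨rfl, rfl⟩ | ⟨rfl, rfl⟩ <;> decide

lemma pv_comp_N : nucComplement.get? 'N' = none := rfl

lemma pv_rc_eq (ys : List Char) :
    reverse_complement ys = ys.reverse.map (fun b => (nucComplement.get? b).getD 'N') := by
  unfold reverse_complement
  rw [PySem.List.slice?_none_none_neg_one]
  rfl

lemma pv_frag_iff (ys : List Char) :
    ((!(ys.contains 'N')) && decide (ys = reverse_complement ys)) = true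
      ↔ ∀ j : Nat, j < ys.length → (ys[j]?.bind nucComplement.get?) = ys[ys.length - 1 - j]? := by
  rw [pv_rc_eq]
  simp only [List.contains_eq_mem, Bool.and_eq_true, Bool.not_eq_eq_eq_not, Bool.not_true,
    decide_eq_false_iff_not, decide_eq_true_eq]
  constructor
  · rintro ⟨hN, heq⟩ j hj
    have hj' : ys.length - 1 - j < ys.length := by omega
    rw [List.getElem?_eq_getElem hj, List.getElem?_eq_getElem hj']
    have hx : ys[j] = (nucComplement.get? ys[ys.length - 1 - j]).getD 'N' := by
      have hx0 := List.getElem_of_eq heq hj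
      simpa [List.getElem_reverse] using hx0
    cases hc : nucComplement.get? ys[ys.length - 1 - j] with
    | none =>
      rw [hc] at hx
      simp only [Option.getD_none] at hx
      exact absurd (hx ▸ ys.getElem_mem hj) hN
    | some z =>
      rw [hc] at hx
      simp only [Option.getD_some] at hx
      simp only [Option.bind_some]
      rw [hx]
      exact pv_comp_symm hc
  · intro h
    have hN : 'N' ∉ ys := by
      intro hmem
      obtain ⟨j, hj, hje⟩ := List.mem_iff_getElem.mp hmem
      have hthis := h j hj
      rw [List.getElem?_eq_getElem hj, hje,
        List.getElem?_eq_getElem (show ys.length - 1 - j < ys.length by omega)] at hthis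
      simp [pv_comp_N] at hthis
    refine ⟨hN, ?_⟩
    apply List.ext_getElem
    · simp
    · intro j h1 h2
      have hj : j < ys.length := h1
      have hthis := h j hj
      rw [List.getElem?_eq_getElem hj,
        List.getElem?_eq_getElem (show ys.length - 1 - j < ys.length by omega)] at hthis
      simp only [Option.bind_some] at hthis
      have hsym := pv_comp_symm hthis
      simp [List.getElem_reverse, hsym]

lemma pv_test_iff (cs : List Char) (i L : Int) (h0 : 0 ≤ i) (h1 : i + L ≤ (cs.length : Int))
    (h2 : 2 ≤ L) (h3 : L % 2 = 0) :
    pvTestA cs L i = true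
      ↔ ∀ k : Nat, (k : Int) ≤ L / 2 - 1 → pvPairOK cs (i + L / 2 - 1 - k) (i + L / 2 + k) = true := by
  obtain ⟨i', rfl⟩ : ∃ i' : Nat, i = (i' : Int) := ⟨i.toNat, by omega⟩
  obtain ⟨L', rfl⟩ : ∃ L' : Nat, L = (L' : Int) := ⟨L.toNat, by omega⟩
  have hL' : 2 ≤ L' := by exact_mod_cast h2
  have hiL : i' + L' ≤ cs.length := by exact_mod_cast h1
  set d := L' / 2 with hd
  have hLd : L' = 2 * d := by omega
  have hdiv : ((L' : Int)) / 2 = (d : Int) := by omega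
  set ys := PySem.List.slice cs (some (i' : Int)) (some ((i' : Int) + (L' : Int))) with hys0
  have hys : ys = (cs.drop i').take L' := by
    rw [hys0]
    rw [show ((i' : Int) + (L' : Int)) = ((i' + L' : Nat) : Int) by push_cast; ring]
    rw [PySem.List.slice_natCast]
    congr 1
    omega
  have hlen : ys.length = L' := by
    rw [hys]
    simp
    omega
  have hget : ∀ j : Nat, j < L' → ys[j]? = cs[i' + j]? := by
    intro j hj
    rw [hys, List.getElem?_take_of_lt hj, List.getElem?_drop]
  have hpair : ∀ a b : Nat, a < cs.length → b < cs.length →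
      (pvPairOK cs (a : Int) (b : Int) = true ↔ cs[a]?.bind nucComplement.get? = cs[b]?) := by
    intro a b ha hb
    unfold pvPairOK
    simp only [Bool.and_eq_true, decide_eq_true_eq, PySem.List.pyGet?_natCast]
    constructor
    · exact fun h => h.2
    · intro h
      exact ⟨⟨by omega, by exact_mod_cast hb⟩, h⟩
  unfold pvTestA
  rw [← hys0, pv_frag_iff]
  constructor
  · intro h k hk
    have hkd : k ≤ d - 1 := by omega
    have hj : d - 1 - k < L' := by omega
    have hthis := h (d - 1 - k) (by omega)
    rw [hget _ (by omega), hget _ (by omega), hlen] at hthis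
    have e1 : (i' : Int) + (L' : Int) / 2 - 1 - (k : Int) = ((i' + (d - 1 - k) : Nat) : Int) := by
      omega
    have e2 : (i' : Int) + (L' : Int) / 2 + (k : Int) = ((i' + (L' - 1 - (d - 1 - k)) : Nat) : Int) := by
      omega
    rw [e1, e2, hpair _ _ (by omega) (by omega)]
    exact hthis
  · intro h j hj
    rw [hlen] at hj
    rw [hget _ hj, hget _ (by omega), hlen]
    by_cases hjd : j < d
    · have hk : ((d - 1 - j : Nat) : Int) ≤ (L' : Int) / 2 - 1 := by omega
      have hthis := h (d - 1 - j) hk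
      rw [show (i' : Int) + (L' : Int) / 2 - 1 - ((d - 1 - j : Nat) : Int) = ((i' + j : Nat) : Int) by push_cast; omega,
        show (i' : Int) + (L' : Int) / 2 + ((d - 1 - j : Nat) : Int) = ((i' + (L' - 1 - j) : Nat) : Int) by push_cast; omega,
        hpair _ _ (by omega) (by omega)] at hthis
      exact hthis
    · -- mirrored half: use symmetry of the complement relation
      have hj' : L' - 1 - j < d := by omega
      have hk : ((d - 1 - (L' - 1 - j) : Nat) : Int) ≤ (L' : Int) / 2 - 1 := by omega
      have hthis := h (d - 1 - (L' - 1 - j)) hk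
      rw [show (i' : Int) + (L' : Int) / 2 - 1 - ((d - 1 - (L' - 1 - j) : Nat) : Int) = ((i' + (L' - 1 - j) : Nat) : Int) by push_cast; omega,
        show (i' : Int) + (L' : Int) / 2 + ((d - 1 - (L' - 1 - j) : Nat) : Int) = ((i' + j : Nat) : Int) by push_cast; omega,
        hpair _ _ (by omega) (by omega)] at hthis
      rw [List.getElem?_eq_getElem (show i' + (L' - 1 - j) < cs.length by omega),
        List.getElem?_eq_getElem (show i' + j < cs.length by omega)] at hthis ⊢
      simp only [Option.bind_some] at hthis ⊢
      exact pv_comp_symm hthis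

lemma pv_test_odd (cs : List Char) (i L : Int) (h0 : 0 ≤ i) (h1 : i + L ≤ (cs.length : Int))
    (h2 : 1 ≤ L) (h3 : L % 2 = 1) : pvTestA cs L i = false := by
  by_contra hne
  have htest : pvTestA cs L i = true := by revert hne; cases pvTestA cs L i <;> simp
  obtain ⟨i', rfl⟩ : ∃ i' : Nat, i = (i' : Int) := ⟨i.toNat, by omega⟩
  obtain ⟨L', rfl⟩ : ∃ L' : Nat, L = (L' : Int) := ⟨L.toNat, by omega⟩
  have hL' : 1 ≤ L' := by exact_mod_cast h2
  have hodd : L' % 2 = 1 := by omega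
  have hiL : i' + L' ≤ cs.length := by exact_mod_cast h1
  set ys := PySem.List.slice cs (some (i' : Int)) (some ((i' : Int) + (L' : Int))) with hys0
  have hys : ys = (cs.drop i').take L' := by
    rw [hys0]
    rw [show ((i' : Int) + (L' : Int)) = ((i' + L' : Nat) : Int) by push_cast; ring]
    rw [PySem.List.slice_natCast]
    congr 1
    omega
  have hlen : ys.length = L' := by
    rw [hys]
    simp
    omega
  unfold pvTestA at htest
  rw [← hys0, pv_frag_iff] at htest
  have hmid := htest (L' / 2) (by omega)
  rw [hlen] at hmid
  have hmid2 : L' - 1 - L' / 2 = L' / 2 := by omega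
  rw [hmid2, List.getElem?_eq_getElem (show L' / 2 < ys.length by omega)] at hmid
  simp only [Option.bind_some] at hmid
  exact absurd rfl (pv_comp_ne_self hmid)

lemma pv_flatMap_ite {α β : Type} (l : List α) (p : α → Bool) (f : α → β) :
    l.flatMap (fun c => if p c = true then [f c] else []) = (l.filter p).map f := by
  induction l with
  | nil => rfl
  | cons x xs ih =>
    rw [List.flatMap_cons, ih, List.filter_cons]
    by_cases hp : p x = true
    · rw [if_pos hp, if_pos hp]
      rfl
    · rw [if_neg hp, if_neg hp]
      rfl

lemma pv_P_filter (cs : List Char) (mn mx : Int) (L : Int) :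
    (((pvP cs mn mx).filter (fun p => p.1 == L)).map (·.2))
      = if 2 ≤ L ∧ L % 2 = 0 ∧ mn ≤ L ∧ L ≤ mx then pvVal cs L else [] := by
  unfold pvP
  rw [List.filter_flatMap]
  simp only [pv_prod_filter cs mn mx L]
  rw [pv_flatMap_ite, List.map_map]
  by_cases hcond : 2 ≤ L ∧ L % 2 = 0 ∧ mn ≤ L ∧ L ≤ mx
  · rw [if_pos hcond]
    obtain ⟨hL2, heven, hmn, hmx⟩ := hcond
    by_cases hn : L ≤ (cs.length : Int)
    · -- split the centre range around the feasible block [L/2, n - L/2 + 1)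
      have hsplit : PySem.List.pyRange 0 ((cs.length : Int) + 1) 1
          = PySem.List.pyRange 0 (L / 2) 1
            ++ (PySem.List.pyRange (L / 2) ((cs.length : Int) - L / 2 + 1) 1
                ++ PySem.List.pyRange ((cs.length : Int) - L / 2 + 1) ((cs.length : Int) + 1) 1) := by
        rw [← PySem.List.pyRange_one_append (L / 2) ((cs.length : Int) - L / 2 + 1) ((cs.length : Int) + 1) (by omega) (by omega)]
        exact PySem.List.pyRange_one_append 0 (L / 2) ((cs.length : Int) + 1) (by omega) (by omega)
      rw [hsplit, List.filter_append, List.filter_append]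
      have hoff : ∀ c : Int, pvC cs mn mx L (c - 1) c = true → L / 2 ≤ c ∧ c < (cs.length : Int) - L / 2 + 1 := by
        intro c hc
        unfold pvC at hc
        simp only [Bool.and_eq_true, decide_eq_true_eq] at hc
        obtain ⟨⟨⟨⟨h1, hpar⟩, -⟩, -⟩, h5⟩ := hc
        have hM := h5 (pvM L (c - 1) c) le_rfl
        unfold pvPairOK at hM
        simp only [Bool.and_eq_true, decide_eq_true_eq] at hM
        unfold pvM at hM
        omega
      have hnil1 : (PySem.List.pyRange 0 (L / 2) 1).filter (fun c => pvC cs mn mx L (c - 1) c) = [] := by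
        rw [List.filter_eq_nil_iff]
        intro c hcmem hc
        rw [PySem.List.mem_pyRange_one] at hcmem
        have := hoff c hc
        omega
      have hnil2 : (PySem.List.pyRange ((cs.length : Int) - L / 2 + 1) ((cs.length : Int) + 1) 1).filter
          (fun c => pvC cs mn mx L (c - 1) c) = [] := by
        rw [List.filter_eq_nil_iff]
        intro c hcmem hc
        rw [PySem.List.mem_pyRange_one] at hcmem
        have := hoff c hc
        omega
      rw [hnil1, hnil2, List.nil_append, List.append_nil]
      -- shift the centre range to the start-index range
      have hshift : PySem.List.pyRange (L / 2) ((cs.length : Int) - L / 2 + 1) 1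
          = (PySem.List.pyRange 0 ((cs.length : Int) - L + 1) 1).map (fun i => L / 2 + i) := by
        rw [PySem.List.pyRange_one, PySem.List.pyRange_one, List.map_map]
        rw [show ((cs.length : Int) - L / 2 + 1 - L / 2).toNat = ((cs.length : Int) - L + 1 - 0).toNat by omega]
        apply List.map_congr_left
        intro k _
        simp only [Function.comp_apply]
        omega
      rw [hshift, List.filter_map, List.map_map]
      unfold pvVal pvIdx
      rw [List.filter_congr (q := pvTestA cs L) (by
        intro i hi
        rw [PySem.List.mem_pyRange_one] at hi
        simp only [Function.comp_apply]
        rw [Bool.eq_iff_iff, pv_test_iff cs i L (by omega) (by omega) hL2 heven]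
        unfold pvC
        simp only [Bool.and_eq_true, decide_eq_true_eq]
        constructor
        · rintro ⟨-, h5⟩ k hk
          have hthis := h5 k (by unfold pvM; omega)
          rw [show i + L / 2 - 1 - (k : Int) = L / 2 + i - 1 - (k : Int) by ring,
            show i + L / 2 + (k : Int) = L / 2 + i + (k : Int) by ring]
          exact hthis
        · intro h5
          refine ⟨⟨⟨⟨by omega, by omega⟩, hmn⟩, hmx⟩, ?_⟩
          intro k hk
          have hk' : (k : Int) ≤ L / 2 - 1 := by
            unfold pvM at hk
            omega
          have hthis := h5 k hk'
          rw [show i + L / 2 - 1 - (k : Int) = L / 2 + i - 1 - (k : Int) by ring,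
            show i + L / 2 + (k : Int) = L / 2 + i + (k : Int) by ring] at hthis
          exact hthis)]
      apply List.map_congr_left
      intro i hi
      have hi' := List.mem_filter.mp hi
      simp only [Function.comp_apply]
      have hM : ((pvM L (L / 2 + i - 1) (L / 2 + i) : Nat) : Int) = L / 2 - 1 := by
        unfold pvM
        omega
      rw [hM]
      unfold pvHit
      rw [show L / 2 + i - 1 - (L / 2 - 1) + 1 = i + 1 by ring,
        show L / 2 + i + (L / 2 - 1) + 1 = i + L by omega,
        show L / 2 + i - 1 - (L / 2 - 1) = i by ring]
    · -- L longer than the sequence: no centre can host it and no window exists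
      rw [List.filter_eq_nil_iff.mpr (by
        intro c hcmem
        intro hc
        unfold pvC at hc
        simp only [Bool.and_eq_true, decide_eq_true_eq] at hc
        obtain ⟨⟨⟨⟨h1, hpar⟩, -⟩, -⟩, h5⟩ := hc
        have hM := h5 (pvM L (c - 1) c) le_rfl
        unfold pvPairOK at hM
        simp only [Bool.and_eq_true, decide_eq_true_eq] at hM
        unfold pvM at hM
        omega)]
      unfold pvVal pvIdx
      rw [PySem.List.pyRange_one_eq_nil (by omega)]
      rfl
  · rw [if_neg hcond]
    rw [List.filter_eq_nil_iff.mpr (by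
      intro c hcmem
      intro hc
      unfold pvC at hc
      simp only [Bool.and_eq_true, decide_eq_true_eq] at hc
      obtain ⟨⟨⟨⟨h1, hpar⟩, h3⟩, h4⟩, -⟩ := hc
      exact hcond ⟨by omega, by omega, h3, h4⟩)]
    rfl

lemma pv_idx_odd (cs : List Char) (L : Int) (hL : 1 ≤ L) (hodd : L % 2 = 1) :
    pvIdx cs L = [] := by
  unfold pvIdx
  rw [List.filter_eq_nil_iff]
  intro i hi
  rw [PySem.List.mem_pyRange_one] at hi
  rw [pv_test_odd cs i L (by omega) (by omega) hL hodd]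
  simp

-- B's result, written with the flattened per-centre production list pvP
lemma pv_B_shape (s : String) (mn mx : Int) :
    find_palindromic_inverted_repeats_alt s mn mx
      = (PySem.List.sorted (PySem.Set.ofList ((pvP s.toList mn mx).map (·.1))) (fun x => x)).map
          (fun L => (L, ((pvP s.toList mn mx).filter (fun p => p.1 == L)).map (·.2))) := by
  unfold find_palindromic_inverted_repeats_alt
  simp only [PySem.List.len_eq]
  have hstep : (fun (b : PySem.Dict Int (List (Int × Int × String))) (c : Int) =>
        pvExpand s.toList (s.toList.length : Int) mn mx (c - 1) c b)
      = (fun b c => (pvProd s.toList mn mx (c - 1) c).foldl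
          (fun b p => b.modify p.1 [] (· ++ [p.2])) b) := by
    funext b c
    exact pv_expand_eq s.toList mn mx (c - 1) c b
  rw [hstep, ← List.foldl_flatMap]
  rw [show (PySem.List.pyRange 0 ((s.toList.length : Int) + 1) 1).flatMap
      (fun c => pvProd s.toList mn mx (c - 1) c) = pvP s.toList mn mx from rfl]
  set P := pvP s.toList mn mx with hP
  have hkeys : ((P.foldl (fun d p => d.modify p.1 [] (· ++ [p.2]))
      (PySem.Dict.empty : PySem.Dict Int (List (Int × Int × String)))).keys)
      = PySem.Set.ofList (P.map (·.1)) := by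
    rw [PySem.Dict.keys_foldl_modify_key P (fun p => p.1) [] (fun _ p => (· ++ [p.2]))]
    exact PySem.Set.update_nil_left _
  rw [hkeys]
  apply List.map_congr_left
  intro L _
  rw [PySem.Dict.getD_foldl_modify_append]
  rfl

lemma pv_B_keys_ge_two (s : String) (mn mx : Int) (L : Int)
    (hL : L ∈ (pvP s.toList mn mx).map (·.1)) : 2 ≤ L := by
  have hfe : (pvP s.toList mn mx).filter (fun p => p.1 == L) ≠ [] := by
    simp only [List.mem_map] at hL
    obtain ⟨p, hp, rfl⟩ := hL
    simp only [ne_eq, List.filter_eq_nil_iff, not_forall]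
    exact ⟨p, hp, by simp⟩
  have hfilter := pv_P_filter s.toList mn mx L
  by_cases hc : 2 ≤ L ∧ L % 2 = 0 ∧ mn ≤ L ∧ L ≤ mx
  · exact hc.1
  · rw [if_neg hc] at hfilter
    exact absurd (List.map_eq_nil_iff.mp hfilter) hfe

lemma pv_B_items (s : String) (mn mx : Int) (hmn : 1 ≤ mn ∨ mx < mn) :
    find_palindromic_inverted_repeats_alt s mn mx
      = (pvLs s.toList mn mx).map (fun L => (L, pvVal s.toList L)) := by
  rw [pv_B_shape]
  set P := pvP s.toList mn mx with hP
  have hmemLs : ∀ L : Int, L ∈ pvLs s.toList mn mx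
      ↔ (2 ≤ L ∧ L % 2 = 0 ∧ mn ≤ L ∧ L ≤ mx) ∧ pvVal s.toList L ≠ [] := by
    intro L
    unfold pvLs
    rw [List.mem_filter, PySem.List.mem_pyRange_one]
    constructor
    · rintro ⟨⟨h1, h2⟩, h3⟩
      have hidx : pvIdx s.toList L ≠ [] := by simpa using h3
      have hmn1 : 1 ≤ mn := by
        rcases hmn with h | h
        · exact h
        · omega
      have heven : L % 2 = 0 := by
        by_contra hodd
        have : L % 2 = 1 := by omega
        exact hidx (pv_idx_odd s.toList L (by omega) this)
      refine ⟨⟨by omega, heven, h1, by omega⟩, ?_⟩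
      unfold pvVal
      simpa using hidx
    · rintro ⟨⟨h1, h2, h3, h4⟩, h5⟩
      have hidx : pvIdx s.toList L ≠ [] := by
        intro hnil
        apply h5
        unfold pvVal
        rw [hnil]
        rfl
      exact ⟨⟨h3, by omega⟩, by simpa using hidx⟩
  have hmemK : ∀ L : Int, L ∈ PySem.Set.ofList (P.map (·.1)) ↔ L ∈ pvLs s.toList mn mx := by
    intro L
    rw [PySem.Set.mem_ofList, hmemLs]
    have hfe : L ∈ P.map (·.1) ↔ (P.filter (fun p => p.1 == L)) ≠ [] := by
      simp [List.filter_eq_nil_iff, List.mem_map]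
    rw [hfe]
    have hfilter := pv_P_filter s.toList mn mx L
    rw [← hP] at hfilter
    constructor
    · intro hne
      have hmapne : ((P.filter (fun p => p.1 == L)).map (·.2)) ≠ [] := by
        simpa using hne
      rw [hfilter] at hmapne
      by_cases hc : 2 ≤ L ∧ L % 2 = 0 ∧ mn ≤ L ∧ L ≤ mx
      · rw [if_pos hc] at hmapne
        exact ⟨hc, hmapne⟩
      · rw [if_neg hc] at hmapne
        exact absurd rfl hmapne
    · rintro ⟨hc, hv⟩
      rw [if_pos hc] at hfilter
      intro hnil
      apply hv
      rw [← hfilter, hnil]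
      rfl
  have hpairLs : (pvLs s.toList mn mx).Pairwise (· < ·) :=
    (PySem.List.pairwise_lt_pyRange_one mn (mx + 1)).sublist List.filter_sublist
  have hsorted : PySem.List.sorted (PySem.Set.ofList (P.map (·.1))) (fun x => x)
      = pvLs s.toList mn mx := by
    apply PySem.List.sorted_eq_of_perm_of_pairwise_lt
    · rw [List.perm_ext_iff_of_nodup (hpairLs.imp ne_of_lt) (PySem.Set.nodup_ofList _)]
      intro L
      exact (hmemK L).symm
    · exact hpairLs
  rw [hsorted]
  apply List.map_congr_left
  intro L hL
  have hfilter := pv_P_filter s.toList mn mx L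
  rw [← hP] at hfilter
  rw [hfilter, if_pos ((hmemLs L).mp hL).1]


-- ===== VERDICT (by name: the statement is the Claim_ definition above) =====
theorem find_palindromic_inverted_repeats_spec : Claim_unchanged_find_palindromic_inverted_repeats := by
  intro s mn mx _ hD
  have hmn : 1 ≤ mn ∨ mx < mn := by
    unfold D_find_palindromic_inverted_repeats at hD
    omega
  rw [pv_A_items, pv_B_items s mn mx hmn]

theorem find_palindromic_inverted_repeats_tight : Claim_exact_find_palindromic_inverted_repeats := by
  intro s mn mx _ hD heq
  obtain ⟨hmn0, hmnmx⟩ := hD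
  have hmnLs : mn ∈ pvLs s.toList mn mx := by
    unfold pvLs
    rw [List.mem_filter, PySem.List.mem_pyRange_one]
    refine ⟨⟨le_rfl, by omega⟩, ?_⟩
    have hw : (-mn) ∈ pvIdx s.toList mn := by
      unfold pvIdx
      rw [List.mem_filter, PySem.List.mem_pyRange_one]
      refine ⟨⟨by omega, by omega⟩, ?_⟩
      have hfrag : PySem.List.slice s.toList (some (-mn)) (some ((-mn) + mn)) = [] := by
        rw [show (-mn) + mn = (0 : Int) by ring,
          PySem.List.slice_toNat s.toList (by omega) (by omega)]
        simp
      unfold pvTestA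
      rw [hfrag]
      rfl
    simpa using List.ne_nil_of_mem hw
  have hmemA : mn ∈ (find_palindromic_inverted_repeats s mn mx).map (·.1) := by
    rw [pv_A_items]
    rw [List.map_map]
    exact List.mem_map.mpr ⟨mn, hmnLs, rfl⟩
  rw [heq, pv_B_shape, List.map_map] at hmemA
  obtain ⟨L, hLmem, hLeq⟩ := List.mem_map.mp hmemA
  have hL : L = mn := hLeq
  subst hL
  have hinP : L ∈ (pvP s.toList L mx).map (·.1) := by
    rw [PySem.List.mem_sorted] at hLmem
    exact (PySem.Set.mem_ofList _ _).mp hLmem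
  have := pv_B_keys_ge_two s L mx L hinP
  omega

theorem find_palindromic_inverted_repeats_changed : Claim_changed_find_palindromic_inverted_repeats := by
  unfold Claim_changed_find_palindromic_inverted_repeats
  refine ⟨by decide, by decide, by decide, ?_, by decide⟩
  simp [find_palindromic_inverted_repeats_alt, pvExpand, pvDiffWitness_find_palindromic_inverted_repeats,
        pvDiffWitnessOut_find_palindromic_inverted_repeats, PySem.List.sorted]
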